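-- pv_equiv track=rewrite | github.com/sajjadGG/euphony-PS | property_signatures.py | input_greater_than_or_equal_output
-- ===== SOURCE A (Python) =====
-- AllTrue = -1
--
-- Mixed = 0
--
-- AllFalse = 1
--
-- def input_greater_than_or_equal_output(input_output, key):
--     is_true_present = False
--     is_false_present = False
--     for in_out in input_output:
--         program_input = in_out[key]
--         output = in_out['out']
--         if program_input >= output:
--             is_true_present = True
--         else:
--             is_false_present = True
--
--     if is_true_present and is_false_present:
--         return Mixed
--     elif is_true_present:
--         return AllTrue
--     else:
--         return AllFalse
-- ===== SOURCE B (Python) =====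
-- AllTrue = -1
--
-- Mixed = 0
--
-- AllFalse = 1
--
-- def input_greater_than_or_equal_output(input_output, key):
--     diffs = [in_out[key] - in_out['out'] for in_out in input_output]
--     if not diffs:
--         return AllFalse
--     if min(diffs) >= 0:
--         return AllTrue
--     if max(diffs) >= 0:
--         return Mixed
--     return AllFalse
-- ===== Notes on version B (the rewrite author's own statement) =====
-- stated objective: alternative
-- what changed: Instead of tracking two boolean flags per row, B materialises the list of numeric differences in_out[key] - in_out['out'] and classifies from its extremes: min >= 0 means AllTrue, otherwise max >= 0 means Mixed, else AllFalse (empty list is AllFalse).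
import Mathlib
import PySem

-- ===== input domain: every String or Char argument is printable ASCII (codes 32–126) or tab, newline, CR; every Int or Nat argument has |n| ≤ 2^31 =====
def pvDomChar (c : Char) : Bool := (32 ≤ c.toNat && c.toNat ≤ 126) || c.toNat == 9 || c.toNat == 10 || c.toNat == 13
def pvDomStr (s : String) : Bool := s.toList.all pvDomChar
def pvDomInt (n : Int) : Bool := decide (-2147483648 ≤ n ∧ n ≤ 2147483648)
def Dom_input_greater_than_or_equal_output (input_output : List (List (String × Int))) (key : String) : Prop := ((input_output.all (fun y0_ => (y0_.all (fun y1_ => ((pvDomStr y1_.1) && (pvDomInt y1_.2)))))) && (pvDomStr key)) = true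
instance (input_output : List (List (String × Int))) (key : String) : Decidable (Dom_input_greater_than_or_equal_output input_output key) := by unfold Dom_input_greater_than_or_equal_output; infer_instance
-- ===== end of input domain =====

-- B classifies from the extremes (min/max) of the list of numeric differences
-- in_out[key] - in_out['out'] instead of A's two in-loop boolean flags; same O(n) cost.

-- ===== PORT A =====
-- literal transliteration: a fold carrying the pair (is_true_present, is_false_present)
def input_greater_than_or_equal_output (input_output : List (List (String × Int))) (key : String) : Int :=
  let flags := input_output.foldl
    (fun (tf : Bool × Bool) in_out =>
      let program_input := (in_out.lookup key).getD 0   -- KeyError excluded by Pre_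
      let output := (in_out.lookup "out").getD 0
      if program_input ≥ output then (true, tf.2) else (tf.1, true))
    (false, false)
  if flags.1 && flags.2 then 0
  else if flags.1 then -1
  else 1

-- ===== PORT B =====
-- literal transliteration of Source B: list of differences, classified by min/max
def input_greater_than_or_equal_output_alt (input_output : List (List (String × Int))) (key : String) : Int :=
  let diffs := input_output.map (fun in_out =>
    (in_out.lookup key).getD 0 - (in_out.lookup "out").getD 0)
  if diffs = [] then 1
  else if (PySem.List.min? diffs (fun x => x)).getD 0 ≥ 0 then -1
  else if (PySem.List.max? diffs (fun x => x)).getD 0 ≥ 0 then 0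
  else 1

-- ===== PRECONDITION & SPEC =====
-- Pre_: every element dict must contain both lookup keys, else Python A raises KeyError
def Pre_input_greater_than_or_equal_output (input_output : List (List (String × Int))) (key : String) : Prop :=
  ∀ d ∈ input_output, (d.lookup key).isSome = true ∧ (d.lookup "out").isSome = true
instance (input_output : List (List (String × Int))) (key : String) : Decidable (Pre_input_greater_than_or_equal_output input_output key) := by unfold Pre_input_greater_than_or_equal_output; infer_instance

def pvWitness_input_greater_than_or_equal_output : (List (List (String × Int))) × String :=
  ([[("x", 3), ("out", 2)], [("x", 0), ("out", 5)]], "x")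

def Spec_input_greater_than_or_equal_output (input_output : List (List (String × Int))) (key : String) (out : Int) : Prop := out = input_greater_than_or_equal_output_alt input_output key
instance (input_output : List (List (String × Int))) (key : String) (out : Int) : Decidable (Spec_input_greater_than_or_equal_output input_output key out) := by unfold Spec_input_greater_than_or_equal_output; infer_instance

-- ===== CLAIM =====
def Claim_equal_input_greater_than_or_equal_output : Prop := ∀ (input_output : List (List (String × Int))) (key : String), Dom_input_greater_than_or_equal_output input_output key → Pre_input_greater_than_or_equal_output input_output key → Spec_input_greater_than_or_equal_output input_output key (input_greater_than_or_equal_output input_output key)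

-- ===== LEMMAS AND PROOFS =====

-- A's fold computes (any element ≥, any element <) over the list
lemma pv_fold (key : String) (xs : List (List (String × Int))) (t f : Bool) :
    xs.foldl
      (fun (tf : Bool × Bool) in_out =>
        let program_input := (in_out.lookup key).getD 0
        let output := (in_out.lookup "out").getD 0
        if program_input ≥ output then (true, tf.2) else (tf.1, true)) (t, f)
    = (t || xs.any (fun d => decide ((d.lookup key).getD 0 ≥ (d.lookup "out").getD 0)),
       f || xs.any (fun d => decide ((d.lookup key).getD 0 < (d.lookup "out").getD 0))) := by
  induction xs generalizing t f with
  | nil => simp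
  | cons x xs ih =>
    by_cases hc : ((x.lookup key).getD 0 : Int) ≥ (x.lookup "out").getD 0
    · simp [hc, ih, not_lt.mpr hc]
    · have hlt : ((x.lookup key).getD 0 : Int) < (x.lookup "out").getD 0 := lt_of_not_ge hc
      simp [hc, ih, hlt]

theorem pv_main (input_output : List (List (String × Int))) (key : String) :
    input_greater_than_or_equal_output input_output key
      = input_greater_than_or_equal_output_alt input_output key := by
  unfold input_greater_than_or_equal_output input_greater_than_or_equal_output_alt
  simp only [pv_fold, Bool.false_or]
  cases hio : input_output.map (fun in_out =>
      ((in_out.lookup key).getD 0 : Int) - (in_out.lookup "out").getD 0) with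
  | nil =>
    have : input_output = [] := by
      cases input_output with
      | nil => rfl
      | cons a t => simp at hio
    subst this; simp
  | cons d ds =>
    -- nonempty case: relate min/max of the diff list to the two any's
    set diffs := d :: ds with hdf
    rw [← hio]
    have hne : input_output.map (fun in_out =>
        ((in_out.lookup key).getD 0 : Int) - (in_out.lookup "out").getD 0) ≠ [] := by
      rw [hio]; simp
    set L := input_output.map (fun in_out =>
        ((in_out.lookup key).getD 0 : Int) - (in_out.lookup "out").getD 0) with hL
    obtain ⟨m, hm⟩ : ∃ m, PySem.List.min? L (fun x => x) = some m := by
      cases h : PySem.List.min? L (fun x => x) with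
      | none => exact absurd ((PySem.List.min?_eq_none_iff _ _).mp h) hne
      | some m => exact ⟨m, rfl⟩
    obtain ⟨M, hM⟩ : ∃ M, PySem.List.max? L (fun x => x) = some M := by
      cases h : PySem.List.max? L (fun x => x) with
      | none => exact absurd ((PySem.List.max?_eq_none_iff _ _).mp h) hne
      | some M => exact ⟨M, rfl⟩
    have hmmem := PySem.List.min?_mem hm
    have hMmem := PySem.List.max?_mem hM
    have hmmin := PySem.List.min?_isMin hm
    have hMmax := PySem.List.max?_isMax hM
    -- translate membership in L into an original element
    have hGe : input_output.any (fun dd => decide ((dd.lookup key).getD 0 ≥ ((dd.lookup "out").getD 0 : Int))) = true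
        ↔ 0 ≤ M := by
      constructor
      · intro h
        rcases List.any_eq_true.mp h with ⟨x, hx, hxx⟩
        have hmemL : ((x.lookup key).getD 0 : Int) - (x.lookup "out").getD 0 ∈ L := by
          rw [hL]; exact List.mem_map.mpr ⟨x, hx, rfl⟩
        have := hMmax _ hmemL
        simp only [decide_eq_true_eq] at hxx
        omega
      · intro h
        rcases List.mem_map.mp (hL ▸ hMmem) with ⟨x, hx, hxeq⟩
        exact List.any_eq_true.mpr ⟨x, hx, by simp only [decide_eq_true_eq]; omega⟩
    have hLt : input_output.any (fun dd => decide ((dd.lookup key).getD 0 < ((dd.lookup "out").getD 0 : Int))) = true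
        ↔ m < 0 := by
      constructor
      · intro h
        rcases List.any_eq_true.mp h with ⟨x, hx, hxx⟩
        have hmemL : ((x.lookup key).getD 0 : Int) - (x.lookup "out").getD 0 ∈ L := by
          rw [hL]; exact List.mem_map.mpr ⟨x, hx, rfl⟩
        have := hmmin _ hmemL
        simp only [decide_eq_true_eq] at hxx
        omega
      · intro h
        rcases List.mem_map.mp (hL ▸ hmmem) with ⟨x, hx, hxeq⟩
        exact List.any_eq_true.mpr ⟨x, hx, by simp only [decide_eq_true_eq]; omega⟩
    have hmM : m ≤ M := hMmax _ hmmem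
    simp only [hm, hM, Option.getD_some, hne]
    by_cases h1 : input_output.any (fun dd => decide ((dd.lookup key).getD 0 ≥ ((dd.lookup "out").getD 0 : Int))) = true <;>
    by_cases h2 : input_output.any (fun dd => decide ((dd.lookup key).getD 0 < ((dd.lookup "out").getD 0 : Int))) = true
    · have hM0 : 0 ≤ M := hGe.mp h1
      have hm0 : m < 0 := hLt.mp h2
      simp [h1, h2, not_le.mpr hm0, hM0]
    · have hM0 : 0 ≤ M := hGe.mp h1
      have hm0 : ¬ m < 0 := fun hc => h2 (hLt.mpr hc)
      simp [h1, h2, le_of_not_gt hm0]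
    · have hM0 : ¬ 0 ≤ M := fun hc => h1 (hGe.mpr hc)
      have hm0 : m < 0 := hLt.mp h2
      simp [h1, h2, not_le.mpr hm0, hM0]
    · -- both any's false: impossible since the list is nonempty
      exfalso
      cases input_output with
      | nil => exact hne (by simp [hL])
      | cons a t =>
        by_cases hc : ((a.lookup key).getD 0 : Int) ≥ (a.lookup "out").getD 0
        · exact h1 (List.any_eq_true.mpr ⟨a, by simp, by simpa using hc⟩)
        · exact h2 (List.any_eq_true.mpr ⟨a, by simp, by simpa using hc⟩)

-- ===== VERDICT =====
theorem input_greater_than_or_equal_output_spec : Claim_equal_input_greater_than_or_equal_output := by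
  intro io key _ _
  unfold Spec_input_greater_than_or_equal_output
  exact pv_main io key
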